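-- pv_equiv track=rewrite | github.com/Lukifuki1/Mia | mia/analysis/quality_analyzer.py | _check_import_organization
-- ===== SOURCE A (Python) =====
-- from typing import Dict, List, Any, Optional, Set
--
-- def _check_import_organization(lines: List[str]) -> bool:
--     """Check if imports are properly organized"""
--     try:
--         import_lines = []
--         for i, line in enumerate(lines):
--             stripped = line.strip()
--             if stripped.startswith(('import ', 'from ')) and not stripped.startswith('#'):
--                 import_lines.append((i, stripped))
--
--         if not import_lines:
--             return True
--
--         # Check if imports are at the top (after docstring/comments)
--         first_import_line = import_lines[0][0]
--
--         # Allow for module docstring and comments at the top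
--         non_import_before = 0
--         for i in range(first_import_line):
--             line = lines[i].strip()
--             if line and not line.startswith('#') and not line.startswith('"""') and not line.startswith("'''"):
--                 non_import_before += 1
--
--         return non_import_before <= 2  # Allow some flexibility
--
--     except Exception:
--         return False
-- ===== SOURCE B (Python) =====
-- def _check_import_organization(lines):
--     """Check if imports are properly organized (single early-exit pass)."""
--     try:
--         disallowed = 0
--         for line in lines:
--             s = line.strip()
--             if s.startswith(('import ', 'from ')) and not s.startswith('#'):
--                 return disallowed <= 2
--             if s and not s.startswith('#') and not s.startswith('"""') and not s.startswith("'''"):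
--                 disallowed += 1
--         return True
--     except Exception:
--         return False
-- ===== Notes on version B (the rewrite author's own statement) =====
-- stated objective: simpler
-- what changed: Replaces A's two passes (collect all import lines with indices, then re-scan the prefix before the first import by index) with a single early-exit loop that counts disallowed lines as it goes and returns as soon as the first import line is seen.
import Mathlib
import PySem

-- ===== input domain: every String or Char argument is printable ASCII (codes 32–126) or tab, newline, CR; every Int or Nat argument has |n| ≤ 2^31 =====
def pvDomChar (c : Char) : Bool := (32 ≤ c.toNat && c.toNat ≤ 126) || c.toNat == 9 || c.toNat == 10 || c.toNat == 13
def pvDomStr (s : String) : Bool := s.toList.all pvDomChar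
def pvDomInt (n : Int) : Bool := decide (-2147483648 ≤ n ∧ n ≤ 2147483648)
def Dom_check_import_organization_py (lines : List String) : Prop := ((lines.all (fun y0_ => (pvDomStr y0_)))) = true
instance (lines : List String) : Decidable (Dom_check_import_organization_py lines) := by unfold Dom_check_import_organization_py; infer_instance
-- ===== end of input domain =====

-- ===== PORT A =====
-- B replaces A's two passes with one early-exit counting loop (simpler); equivalence is about the return value.

-- shared helper: the import-line test on an already-stripped line
def pvImp (s : String) : Bool :=
  (PySem.Str.startswith s "import " || PySem.Str.startswith s "from ") && !(PySem.Str.startswith s "#")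

-- shared helper: a line that is disallowed before the first import
def pvDis (s : String) : Bool :=
  decide (s ≠ "") && !(PySem.Str.startswith s "#") && !(PySem.Str.startswith s "\"\"\"") && !(PySem.Str.startswith s "'''")

def check_import_organization_py (lines : List String) : Bool :=
  let import_lines : List (Int × String) :=
    (PySem.List.enumerate lines).foldl
      (fun acc p => if pvImp (PySem.Str.strip p.2) then acc ++ [(p.1, PySem.Str.strip p.2)] else acc) []
  match import_lines with
  | [] => true
  | (first_import_line, _) :: _ =>
    let non_import_before : Int :=
      (PySem.List.pyRange 0 first_import_line 1).foldl
        (fun acc j => if pvDis (PySem.Str.strip (PySem.List.pyGetD lines j "")) then acc + 1 else acc) 0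
    decide (non_import_before ≤ 2)

-- ===== PORT B =====
def pvAltGo : List String → Int → Bool
  | [], _ => true
  | l :: rest, c =>
    let s := PySem.Str.strip l
    if pvImp s then decide (c ≤ 2)
    else pvAltGo rest (if pvDis s then c + 1 else c)

def check_import_organization_py_alt (lines : List String) : Bool := pvAltGo lines 0

-- ===== PRECONDITION & SPEC =====
def Spec_check_import_organization_py (lines : List String) (out : Bool) : Prop := out = check_import_organization_py_alt lines
instance (lines : List String) (out : Bool) : Decidable (Spec_check_import_organization_py lines out) := by unfold Spec_check_import_organization_py; infer_instance

-- ===== CLAIM (what is proved, stated in full; the proofs are below) =====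
def Claim_equal_check_import_organization_py : Prop := ∀ (lines : List String), Dom_check_import_organization_py lines → Spec_check_import_organization_py lines (check_import_organization_py lines)

-- ===== LEMMAS AND PROOFS =====

-- the count B maintains, as a function of the already-seen prefix
def pvCnt (pre : List String) : Int :=
  ((pre.filter (fun s => pvDis (PySem.Str.strip s))).length : Int)

theorem pvCnt_append_singleton (pre : List String) (l : String) :
    pvCnt (pre ++ [l]) = if pvDis (PySem.Str.strip l) then pvCnt pre + 1 else pvCnt pre := by
  simp [pvCnt, List.filter_append]
  split_ifs with h <;> simp [h]

-- A's second loop over range(first_import_line) counts exactly pvCnt pre when lines = pre ++ suf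
theorem pvFoldCnt (l : List String) : ∀ init : Int,
    l.foldl (fun acc s => if pvDis (PySem.Str.strip s) then acc + 1 else acc) init = init + pvCnt l := by
  induction l with
  | nil => intro init; simp [pvCnt]
  | cons x t ih =>
    intro init
    simp only [List.foldl_cons, ih, pvCnt, List.filter_cons]
    split_ifs with h
    · simp
      omega
    · simp [h]

theorem pvLoop2 (pre suf : List String) :
    (PySem.List.pyRange 0 (pre.length : Int) 1).foldl
      (fun acc j => if pvDis (PySem.Str.strip (PySem.List.pyGetD (pre ++ suf) j "")) then acc + 1 else acc) 0
    = pvCnt pre := by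
  have hcong :
      (PySem.List.pyRange 0 (pre.length : Int) 1).foldl
        (fun acc j => if pvDis (PySem.Str.strip (PySem.List.pyGetD (pre ++ suf) j "")) then acc + 1 else acc) (0 : Int)
      = (PySem.List.pyRange 0 (pre.length : Int) 1).foldl
        (fun acc j => if pvDis (PySem.Str.strip (PySem.List.pyGetD pre j "")) then acc + 1 else acc) (0 : Int) := by
    apply PySem.List.foldl_congr_mem
    intro acc j hj
    rw [PySem.List.mem_pyRange_one] at hj
    have hget : PySem.List.pyGetD (pre ++ suf) j "" = PySem.List.pyGetD pre j "" := by
      rw [PySem.List.pyGetD_eq_getElem _ _ hj.1 (by simp only [List.length_append]; push_cast; omega),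
          PySem.List.pyGetD_eq_getElem _ _ hj.1 hj.2]
      exact List.getElem_append_left (by omega)
    rw [hget]
  refine hcong.trans ?_
  rw [PySem.List.foldl_pyRange_zero_pyGetD' pre ""
        (fun acc s => if pvDis (PySem.Str.strip s) then acc + 1 else acc) 0,
      pvFoldCnt]
  simp

-- no element of pre passes the import test ⇒ A's first loop collects nothing from pre
theorem pvFilterNil (pre : List String) (s : Int)
    (h : ∀ x ∈ pre, pvImp (PySem.Str.strip x) = false) :
    (PySem.List.enumerate pre s).filter (fun p => pvImp (PySem.Str.strip p.2)) = [] := by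
  rw [List.filter_eq_nil_iff]
  intro p hp
  rw [PySem.List.mem_enumerate_iff] at hp
  obtain ⟨k, hk, rfl⟩ := hp
  simp [h _ (List.getElem_mem hk)]

-- main induction: if no line of pre is an import line, A on pre ++ suf equals B's loop on suf with counter pvCnt pre
theorem pvMain (suf : List String) : ∀ pre : List String,
    (∀ s ∈ pre, pvImp (PySem.Str.strip s) = false) →
    check_import_organization_py (pre ++ suf) = pvAltGo suf (pvCnt pre) := by
  induction suf with
  | nil =>
    intro pre h
    simp only [check_import_organization_py, List.append_nil,
      PySem.List.foldl_append_if, pvFilterNil pre 0 h, List.map_nil]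
    rfl
  | cons l rest ih =>
    intro pre h
    by_cases hl : pvImp (PySem.Str.strip l) = true
    · simp only [check_import_organization_py, PySem.List.foldl_append_if, List.nil_append,
        PySem.List.enumerate_append, PySem.List.enumerate_cons, List.filter_append,
        pvFilterNil pre 0 h, List.filter_cons, hl, if_pos, List.map_cons, zero_add]
      simp only [pvAltGo, hl, if_pos]
      rw [pvLoop2 pre (l :: rest)]
    · have hsplit : pre ++ l :: rest = (pre ++ [l]) ++ rest := by simp
      rw [hsplit, ih (pre ++ [l]) (by
        intro s hs
        rcases List.mem_append.mp hs with hs | hs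
        · exact h s hs
        · simp only [List.mem_singleton] at hs; subst hs
          exact eq_false_of_ne_true hl)]
      have hl' : pvImp (PySem.Str.strip l) = false := eq_false_of_ne_true hl
      simp only [pvAltGo, hl', pvCnt_append_singleton, Bool.false_eq_true, if_false]

-- ===== VERDICT (by name: the statement is the Claim_ definition above) =====
theorem check_import_organization_py_spec : Claim_equal_check_import_organization_py := by
  intro lines _
  unfold Spec_check_import_organization_py check_import_organization_py_alt
  simpa [pvCnt] using pvMain lines [] (by simp)
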